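-- pv_equiv track=rewrite | github.com/nichwall/Encryption | decryptor4.py | dig_two
-- ===== SOURCE A (Python) =====
-- def dig_two(string,seed):
--     outStr = ''
--     for i in range(len(string)):
--         if i%2==0 and i!=0:
--             outStr+= string[i]
--             outStr+= string[i-1]
--         elif i == 0:
--             outStr+= string[i]
--         elif i%2==1 and i == len(string)-1:
--             outStr+= string[i]
--     return(outStr)
-- ===== SOURCE B (Python) =====
-- def dig_two(string, seed):
--     swapped = [string[i + 1] + string[i] for i in range(1, len(string) - 1, 2)]
--     tail = string[-1] if string and len(string) % 2 == 0 else ''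
--     return string[:1] + ''.join(swapped) + tail
-- ===== Notes on version B (the rewrite author's own statement) =====
-- stated objective: simpler
-- what changed: A's per-index loop with a three-way branch deciding for every index whether to emit nothing, the pair swapped, the first char or the trailing char is replaced by one stride-2 comprehension over the pair start positions joined between string[:1] and an explicit even-length tail.
import Mathlib
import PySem

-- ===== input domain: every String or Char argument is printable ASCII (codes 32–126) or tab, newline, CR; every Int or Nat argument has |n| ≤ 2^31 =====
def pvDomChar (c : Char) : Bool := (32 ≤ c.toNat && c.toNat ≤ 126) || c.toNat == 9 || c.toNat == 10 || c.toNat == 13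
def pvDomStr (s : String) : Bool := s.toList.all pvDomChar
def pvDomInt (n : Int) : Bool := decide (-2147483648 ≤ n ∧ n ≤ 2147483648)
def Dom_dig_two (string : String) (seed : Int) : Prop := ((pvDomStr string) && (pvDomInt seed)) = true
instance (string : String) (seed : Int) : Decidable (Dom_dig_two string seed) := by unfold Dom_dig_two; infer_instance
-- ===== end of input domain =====

-- B replaces A's index-by-index accumulator loop (three-way branch at every index) by one
-- stride-2 comprehension over the pair start positions plus an explicit tail; objective: simpler.
-- Both are total; the unused 'seed' parameter is kept as in the original.

-- ===== PORT A =====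
-- literal transliteration of Source A: for i in range(len(string)) building outStr by +=.
-- string[i] with i always in range is ported as pyGetD (the default ' ' is never read).
def dig_two (string : String) (seed : Int) : String :=
  let s := string.toList
  String.mk ((PySem.List.pyRange 0 (s.length : Int) 1).foldl
    (fun outStr i =>
      if PySem.Int.mod i 2 == 0 && i != 0 then
        outStr ++ [PySem.List.pyGetD s i ' '] ++ [PySem.List.pyGetD s (i - 1) ' ']
      else if i == 0 then
        outStr ++ [PySem.List.pyGetD s i ' ']
      else if PySem.Int.mod i 2 == 1 && i == (s.length : Int) - 1 then
        outStr ++ [PySem.List.pyGetD s i ' ']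
      else outStr) [])

-- ===== PORT B =====
-- literal transliteration of Source B: the comprehension is a map over range(1, len-1, 2),
-- ''.join is flatten, string[:1] is take 1, string[-1] is pyGetD at -1 (in range: never the default).
def dig_two_alt (string : String) (seed : Int) : String :=
  let s := string.toList
  let swapped := (PySem.List.pyRange 1 ((s.length : Int) - 1) 2).map
    (fun i => [PySem.List.pyGetD s (i + 1) ' ', PySem.List.pyGetD s i ' '])
  let tail := if !s.isEmpty && PySem.Int.mod (s.length : Int) 2 == 0
              then [PySem.List.pyGetD s (-1) ' '] else []
  String.mk (s.take 1 ++ swapped.flatten ++ tail)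

-- ===== PRECONDITION & SPEC =====
def Spec_dig_two (string : String) (seed : Int) (out : String) : Prop := out = dig_two_alt string seed
instance (string : String) (seed : Int) (out : String) : Decidable (Spec_dig_two string seed out) := by unfold Spec_dig_two; infer_instance

-- ===== CLAIM (what is proved, stated in full; the proofs are below) =====
def Claim_equal_dig_two : Prop := ∀ (string : String) (seed : Int), Dom_dig_two string seed → Spec_dig_two string seed (dig_two string seed)

-- ===== LEMMAS AND PROOFS =====

-- common specification both ports are reduced to: adjacent pairs of the tail swapped,
-- an odd leftover kept in place
def pvSw : List Char → List Char
  | [] => []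
  | [a] => [a]
  | a :: b :: t => b :: a :: pvSw t

-- per-index contribution of A's loop body
def pvG (s : List Char) (i : Int) : List Char :=
  if PySem.Int.mod i 2 == 0 && i != 0 then
    [PySem.List.pyGetD s i ' ', PySem.List.pyGetD s (i - 1) ' ']
  else if i == 0 then [PySem.List.pyGetD s i ' ']
  else if PySem.Int.mod i 2 == 1 && i == (s.length : Int) - 1 then [PySem.List.pyGetD s i ' ']
  else []

lemma pvMod2 (j : Nat) : PySem.Int.mod (j : Int) 2 = ((j % 2 : Nat) : Int) := by
  exact_mod_cast PySem.Int.mod_natCast j 2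

lemma pvGetLast (l : List Char) (h : 1 ≤ l.length) :
    PySem.List.pyGetD l (-1) ' ' = l[l.length - 1]'(by omega) := by
  simp only [PySem.List.pyGetD, PySem.List.pyGet?, PySem.List.pyIdx?]
  norm_num
  rw [if_pos (by omega)]
  simp [List.getElem?_eq_getElem (by omega : l.length - 1 < l.length)]

lemma pvA_foldl_eq_flatMap (s : List Char) (r : List Int) (acc : List Char) :
    r.foldl (fun outStr i =>
      if PySem.Int.mod i 2 == 0 && i != 0 then
        outStr ++ [PySem.List.pyGetD s i ' '] ++ [PySem.List.pyGetD s (i - 1) ' ']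
      else if i == 0 then
        outStr ++ [PySem.List.pyGetD s i ' ']
      else if PySem.Int.mod i 2 == 1 && i == (s.length : Int) - 1 then
        outStr ++ [PySem.List.pyGetD s i ' ']
      else outStr) acc = acc ++ r.flatMap (pvG s) := by
  have h : (fun (outStr : List Char) (i : Int) =>
      if PySem.Int.mod i 2 == 0 && i != 0 then
        outStr ++ [PySem.List.pyGetD s i ' '] ++ [PySem.List.pyGetD s (i - 1) ' ']
      else if i == 0 then
        outStr ++ [PySem.List.pyGetD s i ' ']
      else if PySem.Int.mod i 2 == 1 && i == (s.length : Int) - 1 then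
        outStr ++ [PySem.List.pyGetD s i ' ']
      else outStr) = fun outStr i => outStr ++ pvG s i := by
    funext outStr i
    simp only [pvG]
    split_ifs <;> simp
  rw [h, PySem.List.foldl_append_eq_flatMap]

-- A's loop from an odd index k onward produces exactly pvSw of the suffix
lemma pvA_chunk (l : List Char) : ∀ (m k : Nat), l.length ≤ k + m → k % 2 = 1 →
    (PySem.List.pyRange (k : Int) (l.length : Int) 1).flatMap (pvG l) = pvSw (l.drop k) := by
  intro m
  induction m with
  | zero =>
    intro k hle hk
    rw [PySem.List.pyRange_one_eq_nil (by exact_mod_cast hle)]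
    rw [List.drop_eq_nil_of_le (by omega)]
    rfl
  | succ m ih =>
    intro k hle hk
    by_cases hkn : l.length ≤ k
    · rw [PySem.List.pyRange_one_eq_nil (by exact_mod_cast hkn)]
      rw [List.drop_eq_nil_of_le hkn]
      rfl
    · push_neg at hkn
      rw [PySem.List.pyRange_one_cons (by exact_mod_cast hkn)]
      by_cases hlast : k + 1 = l.length
      · -- k is the last index (odd): third branch fires, range ends
        have hnil : PySem.List.pyRange ((k : Int) + 1) (l.length : Int) 1 = [] :=
          PySem.List.pyRange_one_eq_nil (by omega)
        rw [hnil]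
        have hg : pvG l (k : Int) = [PySem.List.pyGetD l (k : Int) ' '] := by
          have heq : (k : Int) = (l.length : Int) - 1 := by omega
          simp [pvG, heq]
          split_ifs <;> first | rfl | omega
        have hdrop : l.drop k = [l[k]'hkn] := by
          rw [List.drop_eq_getElem_cons hkn, List.drop_eq_nil_of_le (by omega)]
        rw [List.flatMap_cons, List.flatMap_nil, hg, hdrop,
            PySem.List.pyGetD_eq_getElem l ' ' (by omega) (by exact_mod_cast hkn)]
        simp [pvSw]
      · -- k and k+1 are both interior; the pair is emitted swapped at index k+1
        have hk1 : k + 1 < l.length := by omega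
        rw [show (k : Int) + 1 = ((k + 1 : Nat) : Int) by push_cast; ring]
        rw [PySem.List.pyRange_one_cons (by exact_mod_cast hk1)]
        have hg0 : pvG l (k : Int) = [] := by
          simp [pvG]
          split_ifs <;> first | rfl | omega
        have hg1 : pvG l ((k + 1 : Nat) : Int) =
            [PySem.List.pyGetD l ((k + 1 : Nat) : Int) ' ',
             PySem.List.pyGetD l (((k + 1 : Nat) : Int) - 1) ' '] := by
          simp [pvG]
          intro hcond
          exfalso
          have h0 := hcond (by omega)
          omega
        rw [show ((k + 1 : Nat) : Int) + 1 = ((k + 2 : Nat) : Int) by push_cast; ring]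
        rw [List.flatMap_cons, List.flatMap_cons, hg0, hg1]
        rw [ih (k + 2) (by omega) (by omega)]
        have e1 : PySem.List.pyGetD l ((k + 1 : Nat) : Int) ' ' = l[k + 1]'hk1 :=
          PySem.List.pyGetD_eq_getElem l ' ' (by omega) (by exact_mod_cast hk1)
        have e2 : PySem.List.pyGetD l (((k + 1 : Nat) : Int) - 1) ' ' = l[k]'hkn := by
          rw [show ((k + 1 : Nat) : Int) - 1 = ((k : Nat) : Int) by push_cast; ring]
          exact PySem.List.pyGetD_eq_getElem l ' ' (by omega) (by exact_mod_cast hkn)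
        rw [e1, e2]
        rw [List.drop_eq_getElem_cons hkn, List.drop_eq_getElem_cons hk1]
        rfl

lemma pvA_eq_spec (l : List Char) :
    (PySem.List.pyRange 0 (l.length : Int) 1).flatMap (pvG l) =
      l.take 1 ++ pvSw (l.drop 1) := by
  cases l with
  | nil => rfl
  | cons c r =>
    have h0 : (0 : Int) < ((c :: r).length : Int) := by
      simp
    rw [PySem.List.pyRange_one_cons h0]
    rw [show (0 : Int) + 1 = ((1 : Nat) : Int) by norm_num]
    rw [List.flatMap_cons]
    have hg : pvG (c :: r) 0 = [PySem.List.pyGetD (c :: r) 0 ' '] := by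
      simp [pvG, PySem.Int.mod]
    rw [hg, pvA_chunk (c :: r) ((c :: r).length) 1 (by omega) (by norm_num)]
    have hc : PySem.List.pyGetD (c :: r) 0 ' ' = c := by
      simpa using PySem.List.pyGetD_natCast (c :: r) 0 ' '
    rw [hc]
    rfl

-- step-2 range peels one element at a time
lemma pvRange_two_cons (a b : Int) (h : a < b) :
    PySem.List.pyRange a b 2 = a :: PySem.List.pyRange (a + 2) b 2 := by
  rw [PySem.List.pyRange_of_pos a b (by norm_num),
      PySem.List.pyRange_of_pos (a + 2) b (by norm_num)]
  rw [if_pos h]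
  by_cases h2 : a + 2 < b
  · rw [if_pos h2]
    have hc : ((b - a + 2 - 1) / 2).toNat = ((b - (a + 2) + 2 - 1) / 2).toNat + 1 := by
      omega
    rw [hc, List.range_succ_eq_map]
    simp only [List.map_cons, List.map_map, Function.comp]
    congr 1
    · norm_num
    · apply List.map_congr_left
      intro x _
      simp only [Function.comp_apply]
      push_cast
      ring
  · rw [if_neg h2]
    have hc : ((b - a + 2 - 1) / 2).toNat = 1 := by omega
    rw [hc]
    simp

lemma pvRange_two_nil (a b : Int) (h : b ≤ a) : PySem.List.pyRange a b 2 = [] := by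
  rw [PySem.List.pyRange_of_pos a b (by norm_num), if_neg (by omega)]
  rfl

-- B's comprehension from an odd start k onward, plus the tail, is pvSw of the suffix
lemma pvB_chunk (l : List Char) : ∀ (m k : Nat), l.length ≤ k + m → k % 2 = 1 → k ≤ l.length →
    ((PySem.List.pyRange (k : Int) ((l.length : Int) - 1) 2).map
        (fun i => [PySem.List.pyGetD l (i + 1) ' ', PySem.List.pyGetD l i ' '])).flatten ++
      (if !l.isEmpty && PySem.Int.mod (l.length : Int) 2 == 0
       then [PySem.List.pyGetD l (-1) ' '] else []) = pvSw (l.drop k) := by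
  intro m
  induction m with
  | zero =>
    intro k hle hk hkn
    rw [pvRange_two_nil _ _ (by omega)]
    have hodd : l.length % 2 = 1 := by omega
    rw [pvMod2 l.length, hodd]
    rw [List.drop_eq_nil_of_le (by omega)]
    simp [pvSw]
  | succ m ih =>
    intro k hle hk hkn
    by_cases hkeq : k = l.length
    · rw [pvRange_two_nil _ _ (by omega)]
      have hodd : l.length % 2 = 1 := by omega
      rw [pvMod2 l.length, hodd]
      rw [List.drop_eq_nil_of_le (by omega)]
      simp [pvSw]
    · have hklt : k < l.length := by omega
      by_cases hlast : k + 1 = l.length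
      · -- k is the last index; the range is empty and the tail branch fires
        rw [pvRange_two_nil _ _ (by omega)]
        have hev : l.length % 2 = 0 := by omega
        rw [pvMod2 l.length, hev]
        have hne : l.isEmpty = false := by
          cases l with
          | nil => simp at hklt
          | cons c r => rfl
        rw [hne]
        norm_num
        rw [pvGetLast l (by omega)]
        rw [List.drop_eq_getElem_cons hklt, List.drop_eq_nil_of_le (by omega)]
        have hik : l.length - 1 = k := by omega
        simp only [hik]
        rfl
      · -- k and k+1 interior: one pair emitted, recurse at k+2
        have hk1 : k + 1 < l.length := by omega
        rw [pvRange_two_cons (k : Int) ((l.length : Int) - 1) (by omega)]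
        rw [show (k : Int) + 2 = ((k + 2 : Nat) : Int) by push_cast; ring]
        rw [List.map_cons, List.flatten_cons, List.append_assoc]
        rw [ih (k + 2) (by omega) (by omega) (by omega)]
        have e1 : PySem.List.pyGetD l ((k : Int) + 1) ' ' = l[k + 1]'hk1 := by
          rw [show (k : Int) + 1 = ((k + 1 : Nat) : Int) by push_cast; ring]
          exact PySem.List.pyGetD_eq_getElem l ' ' (by omega) (by exact_mod_cast hk1)
        have e2 : PySem.List.pyGetD l (k : Int) ' ' = l[k]'hklt :=
          PySem.List.pyGetD_eq_getElem l ' ' (by omega) (by exact_mod_cast hklt)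
        rw [e1, e2]
        rw [List.drop_eq_getElem_cons hklt, List.drop_eq_getElem_cons hk1]
        rfl

lemma pvB_eq_spec (l : List Char) :
    l.take 1 ++
      ((PySem.List.pyRange 1 ((l.length : Int) - 1) 2).map
        (fun i => [PySem.List.pyGetD l (i + 1) ' ', PySem.List.pyGetD l i ' '])).flatten ++
      (if !l.isEmpty && PySem.Int.mod (l.length : Int) 2 == 0
       then [PySem.List.pyGetD l (-1) ' '] else []) = l.take 1 ++ pvSw (l.drop 1) := by
  cases l with
  | nil => rfl
  | cons c r =>
    rw [List.append_assoc]
    congr 1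
    rw [show (1 : Int) = ((1 : Nat) : Int) by norm_num]
    exact pvB_chunk (c :: r) ((c :: r).length) 1 (by omega) (by norm_num) (by simp)

-- ===== VERDICT (by name: the statement is the Claim_ definition above) =====
theorem dig_two_spec : Claim_equal_dig_two := by
  intro string seed _
  unfold Spec_dig_two
  simp only [dig_two, dig_two_alt]
  rw [pvA_foldl_eq_flatMap, List.nil_append, pvA_eq_spec, pvB_eq_spec]
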